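-- pv_equiv track=rewrite | github.com/daveyboyc/cm-search | checker/management/commands/smart_business_identification.py | matches_location_context
-- ===== SOURCE A (Python) =====
-- def matches_location_context(facility_types, location):
--     """Check if facility types match the location context"""
--     location_lower = location.lower()
--
--     context_matches = {
--         'energy_facility': ['energy', 'power', 'electricity'],
--         'water_facility': ['water', 'pumping', 'treatment'],
--         'research_facility': ['research', 'centre', 'university'],
--         'logistics_facility': ['distribution', 'depot', 'warehouse']
--     }
--
--     for facility_type in facility_types:
--         if facility_type in context_matches:
--             keywords = context_matches[facility_type]
--             if any(keyword in location_lower for keyword in keywords):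
--                 return True
--
--     return False
-- ===== SOURCE B (Python) =====
-- def matches_location_context(facility_types, location):
--     """Check if facility types match the location context"""
--     location_lower = location.lower()
--
--     context_matches = {
--         'energy_facility': ['energy', 'power', 'electricity'],
--         'water_facility': ['water', 'pumping', 'treatment'],
--         'research_facility': ['research', 'centre', 'university'],
--         'logistics_facility': ['distribution', 'depot', 'warehouse']
--     }
--
--     # pass 1: precompute the set of context names whose keywords hit the location
--     matching_contexts = {
--         name
--         for name, keywords in context_matches.items()
--         if any(keyword in location_lower for keyword in keywords)
--     }
--
--     # pass 2: membership test
--     return any(ft in matching_contexts for ft in facility_types)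
-- ===== Notes on version B (the rewrite author's own statement) =====
-- stated objective: alternative
-- what changed: B first precomputes the set of context names whose keyword list hits the lowered location, then tests facility_types for membership in that set, instead of A's per-facility-type dict lookup with an inner keyword scan and early return.
import Mathlib
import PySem

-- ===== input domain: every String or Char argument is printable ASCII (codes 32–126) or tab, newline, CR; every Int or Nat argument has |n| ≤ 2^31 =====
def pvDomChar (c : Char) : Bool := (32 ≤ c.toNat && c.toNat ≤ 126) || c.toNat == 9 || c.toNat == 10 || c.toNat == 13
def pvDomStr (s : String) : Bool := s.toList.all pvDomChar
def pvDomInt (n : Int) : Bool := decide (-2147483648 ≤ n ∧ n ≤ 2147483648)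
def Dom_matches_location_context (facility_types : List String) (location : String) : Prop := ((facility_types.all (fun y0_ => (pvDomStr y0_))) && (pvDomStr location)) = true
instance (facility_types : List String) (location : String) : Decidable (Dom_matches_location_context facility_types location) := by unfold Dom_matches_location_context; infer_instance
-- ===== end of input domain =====

-- B precomputes the set of matching context names once, then tests facility_types for membership in it (alternative decomposition; same result).
-- ===== PORT A =====
def pvContextMatches : PySem.Dict String (List String) :=
  PySem.Dict.mk [("energy_facility", ["energy", "power", "electricity"]),
                 ("water_facility", ["water", "pumping", "treatment"]),
                 ("research_facility", ["research", "centre", "university"]),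
                 ("logistics_facility", ["distribution", "depot", "warehouse"])]

-- the for-loop with its early `return True`
def pvLoopA (fts : List String) (locationLower : String) : Bool :=
  match fts with
  | [] => false
  | ft :: rest =>
    if pvContextMatches.contains ft then
      if (pvContextMatches.getD ft []).any (fun kw => PySem.Str.isIn kw locationLower) then
        true
      else pvLoopA rest locationLower
    else pvLoopA rest locationLower

def matches_location_context (facility_types : List String) (location : String) : Bool :=
  pvLoopA facility_types (PySem.Str.lower location)

-- ===== PORT B =====
-- pass 1: the set of context names whose keywords hit the lowered location
def pvMatchingContexts (locationLower : String) : PySem.Set String :=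
  PySem.Set.ofList
    ((pvContextMatches.items.filter
        (fun p => p.2.any (fun kw => PySem.Str.isIn kw locationLower))).map Prod.fst)

def matches_location_context_alt (facility_types : List String) (location : String) : Bool :=
  let locationLower := PySem.Str.lower location
  let matching := pvMatchingContexts locationLower
  facility_types.any (fun ft => matching.contains ft)

-- ===== PRECONDITION & SPEC =====
def Spec_matches_location_context (facility_types : List String) (location : String) (out : Bool) : Prop := out = matches_location_context_alt facility_types location
instance (facility_types : List String) (location : String) (out : Bool) : Decidable (Spec_matches_location_context facility_types location out) := by unfold Spec_matches_location_context; infer_instance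

-- ===== CLAIM (what is proved, stated in full; the proofs are below) =====
def Claim_equal_matches_location_context : Prop := ∀ (facility_types : List String) (location : String), Dom_matches_location_context facility_types location → Spec_matches_location_context facility_types location (matches_location_context facility_types location)

-- ===== LEMMAS AND PROOFS =====

-- ===== VERDICT (by name: the statement is the Claim_ definition above) =====
-- generic: membership of ft in the names of the q-filtered association list
-- equals (dict contains ft && q (value at ft)), when keys are distinct
theorem pvFilterNames_eq (q : List String → Bool) (ps : List (String × List String))
    (ft : String) (hnd : (ps.map Prod.fst).Nodup) :
    ((ps.filter (fun p => q p.2)).map Prod.fst).contains ft =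
      ((PySem.Dict.mk ps).contains ft && q ((PySem.Dict.mk ps).getD ft [])) := by
  induction ps with
  | nil => simp [PySem.Dict.contains, PySem.Dict.getD, PySem.Dict.get?]
  | cons p rest ih =>
    obtain ⟨k, v⟩ := p
    simp only [List.map_cons, List.nodup_cons] at hnd
    have ihh := ih hnd.2
    by_cases hk : k = ft
    · subst hk
      have hrest : ((rest.filter (fun p => q p.2)).map Prod.fst).contains k = false := by
        simp only [List.contains_eq_mem, decide_eq_false_iff_not, List.mem_map,
          List.mem_filter]
        rintro ⟨⟨k', v'⟩, ⟨hmem, -⟩, hfst⟩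
        exact hnd.1 (hfst ▸ List.mem_map_of_mem hmem)
      simp only [List.contains_eq_mem, decide_eq_false_iff_not] at hrest
      cases hq : q v <;>
        simp [hq, hrest, PySem.Dict.contains, PySem.Dict.getD,
          PySem.Dict.get?]
    · have hbeq : (k == ft) = false := by simp [hk]
      have hbeq2 : (ft == k) = false := by simp [Ne.symm hk]
      cases hq : q v <;>
        simp [hq, hbeq, hbeq2, Ne.symm hk, PySem.Dict.contains,
          PySem.Dict.getD, PySem.Dict.get?] at ihh ⊢ <;>
        exact ihh

-- pointwise: membership in the precomputed set = A's per-type test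
theorem pvPointwise (loc ft : String) :
    (pvMatchingContexts loc).contains ft =
      (pvContextMatches.contains ft &&
        (pvContextMatches.getD ft []).any (fun kw => PySem.Str.isIn kw loc)) := by
  calc (pvMatchingContexts loc).contains ft
      = ((pvContextMatches.items.filter
            (fun p => p.2.any (fun kw => PySem.Str.isIn kw loc))).map Prod.fst).contains ft := by
        simp [pvMatchingContexts, PySem.Set.contains_eq_listContains,
          PySem.Set.mem_ofList, List.contains_eq_mem]
    _ = _ := pvFilterNames_eq (fun v => v.any (fun kw => PySem.Str.isIn kw loc))
          pvContextMatches.items ft (by decide)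

theorem pvLoopA_eq (fts : List String) (loc : String) :
    pvLoopA fts loc = fts.any (fun ft => (pvMatchingContexts loc).contains ft) := by
  induction fts with
  | nil => rfl
  | cons ft rest ih =>
    simp only [pvLoopA, List.any_cons, ih, pvPointwise]
    cases h : pvContextMatches.contains ft <;>
    cases h2 : (pvContextMatches.getD ft []).any (fun kw => PySem.Str.isIn kw loc) <;>
      simp

theorem matches_location_context_spec : Claim_equal_matches_location_context := by
  intro fts loc _
  unfold Spec_matches_location_context matches_location_context matches_location_context_alt
  exact pvLoopA_eq fts (PySem.Str.lower loc)
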